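/-
  THE FIELD VOCABULARY AT WORK (Vorbis/Fields.lean): one example of each thing a predicate file or a function proof does with it.
      (a) reading fields through the accessors, and what they unfold to
      (b) a load as the stepper leaves it, rewritten to an accessor
      (c) an accessor carried over a store elsewhere, over a callee's footprint, and read back after a store to it
      (d) a check site: `AccessibleSmall` for a field access from a live block
-/
import Vorbis.Fields
namespace Vorbis.FieldsTest
open X86 X86.User Asan Vorbis

/-! ### (a) Accessors -/

/-- `f->channels` is the `int` at `f + 4`. -/
example (mem : Mem) (f : Nat) : stb_vorbis.channels mem f = mem.i32 (f + 4) := by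
  simp only [vacc, voff]

/-- `f->codebooks[i].entries`: the pointer field, the element address, the field of the element. -/
example (mem : Mem) (f i : Nat) :
    Codebook.entries mem (stb_vorbis.codebooks_at mem f i) = mem.i32 (mem.u64 (f + 168) + 2120 * i + 4) := by
  simp only [vacc, voff]

/-- `c->fast_huffman[k]`: an array of `int16` inside the struct. -/
example (mem : Mem) (c k : Nat) : Codebook.fast_huffman mem c k = mem.i16 (c + 48 + 2 * k) := by
  simp only [vacc, voff]

/-- `g->subclass_books[j][k]`: a two-dimensional array, row-major. -/
example (mem : Mem) (g j k : Nat) : Floor1.subclass_books mem g j k = mem.i16 (g + 82 + 2 * (8 * j + k)) := by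
  simp only [vacc, voff]

/-- `m->submap_floor[s]`: a byte array (no `1 * s`). The offset 17 and the neighbour's 33 are FIX 8's layout. -/
example (mem : Mem) (m s : Nat) : Mapping.submap_floor mem m s = mem.u8 (m + 17 + s) := by
  simp only [vacc, voff]

/-- `f->mode_config[i].mapping`: an embedded array of structs: the address of the element, then the element's accessor. -/
example (mem : Mem) (f i : Nat) : Mode.mapping mem (stb_vorbis.mode_config_at f i) = mem.u8 (f + 484 + 6 * i + 1) := by
  simp only [vacc, voff]

/-- `f->alloc.alloc_buffer`: an embedded struct, flattened. -/
example (mem : Mem) (f : Nat) : stb_vorbis.alloc.alloc_buffer mem f = mem.u64 (f + 112) := by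
  simp only [vacc, voff]

/-- The union `Floor`: `g->floor1.values` through the union and through `Floor1` are the same read. -/
example (mem : Mem) (g : Nat) : Floor.floor1.values mem g = Floor1.values mem g := by
  simp only [vacc, voff]

/-- `f->channel_buffers[c]` and the address of `f->channel_buffers[c][n]`. -/
example (mem : Mem) (f c n : Nat) : stb_vorbis.channel_buffers_at mem f c n = mem.u64 (f + 872 + 8 * c) + 4 * n := by
  simp only [vacc, voff]

/-- An invariant clause as a predicate file writes it (HD1), and what `omega` sees of it. -/
example (mem : Mem) (f : Nat) (hd1 : 1 ≤ stb_vorbis.channels mem f ∧ stb_vorbis.channels mem f ≤ 16) :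
    mem.u32 (f + 4) ≤ 16 := by
  simp only [vacc, voff] at hd1
  have h := mem.i32_cases (f + 4)
  omega

/-- The offsets are numerals for `omega` after `simp only [voff]`: element `s < 16` of `submap_residue` lies inside the `Mapping`. -/
example (s : Nat) (h : s < Off.Mapping.submap_residue.count) :
    Off.Mapping.submap_residue + s + 1 ≤ Off.sizeof.Mapping := by
  simp only [voff] at *
  omega

/-! ### (b) From the stepper's shapes to the accessors -/

/-- `mov eax, [r14 + 2112]` with `r14 = c`: the new `rax` is the number `c->sorted_entries` (unsigned reading). -/
example (u : State) (c : Nat) (hr : (u.reg .r14).toNat = c) :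
    Word.ofBV (BitVec.ofNat 32 (u.mem.readLE (u.reg .r14 + 2112) 4)) = addr (u.mem.u32 (c + 2112)) := by
  rw [eq_addr _ _ hr]
  simp only [vfield]

/-- The same, up to the accessor: under the invariant `0 ≤ c->sorted_entries` the register holds that number. -/
example (u : State) (c : Nat) (hr : u.reg .r14 = addr c) (h0 : 0 ≤ Codebook.sorted_entries u.mem c) :
    Word.ofBV (BitVec.ofNat 32 (u.mem.readLE (u.reg .r14 + 2112) 4)) = addr (Codebook.sorted_entries u.mem c).toNat := by
  simp only [vacc, voff] at h0 ⊢
  rw [hr]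
  simp only [vfield]
  rw [u.mem.u32_of_i32_nonneg _ h0]

/-- `movsxd rax, dword [rbx + 4]`: the register is the `word` of `f->channels`. -/
example (u : State) (f : Nat) (hr : u.reg .rbx = addr f) :
    Word.ofBV (BitVec.signExtend 64 (BitVec.ofNat 32 (u.mem.readLE (u.reg .rbx + 4) 4))) = word (stb_vorbis.channels u.mem f) := by
  simp only [vacc, voff]
  rw [hr]
  simp only [vfield]

/-- `movsx eax, word [rdi + rax * 2 + 48]` with `rdi = c`, `rax = k`: `c->fast_huffman[k]`, scaled index and displacement. -/
example (mem : Mem) (c k : Nat) :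
    Word.ofBV (BitVec.signExtend 32 (BitVec.ofNat 16 (mem.readLE (addr c + addr k * 2 + 48) 2)))
      = word32 (Codebook.fast_huffman mem c k) := by
  simp only [vacc, voff, vfield]
  rw [Nat.mul_comm k 2, Nat.add_right_comm]

/-- `mov rax, [rbx + 168]`: a pointer field; the register is the `addr` of the pointer, ready for the next access. -/
example (mem : Mem) (f : Nat) : UInt64.ofNat (mem.readLE (addr f + 168) 8) = addr (stb_vorbis.codebooks mem f) := by
  simp only [vacc, voff, vfield]

/-- `movzx eax, byte [rdx + rcx + 17]`: `m->submap_floor[s]`. -/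
example (mem : Mem) (m s : Nat) :
    Word.ofBV (BitVec.zeroExtend 32 (BitVec.ofNat 8 (mem.readLE (addr m + addr s + 17) 1))) = addr (Mapping.submap_floor mem m s) := by
  simp only [vacc, voff, vfield]
  rw [Nat.add_right_comm]

/-- `cmp dword [rbx + 4], 16`: the operand stays a 32-bit vector; its signed value is the field. -/
example (mem : Mem) (f : Nat) : (BitVec.ofNat 32 (mem.readLE (addr f + 4) 4)).toInt = stb_vorbis.channels mem f := by
  simp only [vacc, voff, vfield]

/-! ### (c) Frame -/

/-- One store of the walker elsewhere (`mov [rsp + 8], eax` while `f` is an arena object): the accessor is unchanged. -/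
example (mem : Mem) (f : Nat) (sp : Word) (v : Nat) (hf : f + 1808 ≤ 0xC00000) (hsp : sp.toNat + 12 ≤ f) :
    stb_vorbis.channels (mem.writeLE (sp + 8) 4 v) f = stb_vorbis.channels mem f := by
  have e : (sp + 8).toNat = sp.toNat + 8 := toNat_add_ofNat sp 8 (by omega)
  simp only [vacc, voff]
  exact mem.i32_writeLE _ 4 v _ (by omega) (by omega) (by omega)

/-- The whole struct kept (`Block.Same`), then any of its fields: an array element, no arithmetic beyond `omega`. -/
example (mem mem' : Mem) (c k : Nat) (hk : k < 1024) (hc : c + 2120 ≤ 0xC00000)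
    (h : (Block.mk c Off.sizeof.Codebook).Same mem mem') :
    Codebook.fast_huffman mem' c k = Codebook.fast_huffman mem c k := by
  simp only [vblock, voff] at h
  simp only [vacc, voff]
  exact h.i16 _ (by omega) (by omega) (by omega)

/-- A callee's footprint (`Mem.SameExcept`, UserX/Contract.lean's `Returned`) that does not meet the struct keeps it. -/
example (mem mem' : Mem) (f lo hi : Nat) (hs : Mem.SameExcept [⟨lo, hi⟩] mem mem') (hd : hi ≤ f) (hf : f + 1808 ≤ 0xC00000) :
    stb_vorbis.codebooks mem' f = stb_vorbis.codebooks mem f := by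
  have h : (Block.mk f 1808).Same mem mem' := by
    apply Block.Same.of_sameExcept hs
    intro w hw
    have e : w = ⟨lo, hi⟩ := List.mem_singleton.mp hw
    subst e
    exact Or.inr hd
  simp only [vblock] at h
  simp only [vacc, voff]
  exact h.u64 _ (by omega) (by omega) (by omega)

/-- A store inside one block keeps a field of a disjoint block. -/
example (mem : Mem) (B C : Block) (b v : Nat) (hd : B.disjoint C) (hb : C.contains b 4) (hB : 12 ≤ B.size)
    (hC : C.base + C.size ≤ 0xC00000) (hBt : B.base + B.size ≤ 0xC00000) :
    Residue.part_size (mem.writeLE (addr b) 4 v) B.base = Residue.part_size mem B.base := by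
  have h := Block.Same.of_writeLE mem b 4 v hd hb (by omega)
  simp only [vacc, voff]
  exact h.u32 _ (by omega) (by omega) (by omega)

/-- A store to the field itself (`mov [rbx + 1768], eax`: `f->valid_bits = eax`), read back: the signed value stored. -/
example (mem : Mem) (f : Nat) (x : BitVec 32) :
    stb_vorbis.valid_bits (mem.writeLE (addr f + 1768) 4 x.toNat) f = x.toInt := by
  simp only [vacc, voff, vfield]
  exact mem.i32_writeLE_same_bv _ x

/-! ### (d) Check sites -/

/-- `__asan_load4_noabort(&f->channels)`: the `stb_vorbis` at `f` is a live block, the shadow covers the live set. -/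
example (Live : Nat → Prop) (mem : Mem) (f : Nat) (hc : Covers Live mem)
    (hf : (Block.mk f Off.sizeof.stb_vorbis).live Live) : AccessibleSmall mem (f + Off.stb_vorbis.channels) 4 := by
  apply acc_of_obj hc hf
  · exact Nat.le_add_right _ _
  · simp only [voff]
    omega
  · omega

/-- The same in one line. -/
example (Live : Nat → Prop) (mem : Mem) (f : Nat) (hc : Covers Live mem)
    (hOB1 : (Block.mk f Off.sizeof.stb_vorbis).live Live) : AccessibleSmall mem (f + Off.stb_vorbis.channels) 4 :=
  acc_of_obj hc hOB1 (Nat.le_add_right _ _) (by simp only [voff]; omega) (by omega)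

/-- The same with `acc_of_field`, for an array element: `__asan_load2_noabort(&c->fast_huffman[k])`, `k < 1024`. -/
example (Live : Nat → Prop) (mem : Mem) (c k : Nat) (hk : k < 1024) (hc : Covers Live mem)
    (hB : (Block.mk c Off.sizeof.Codebook).live Live) :
    AccessibleSmall mem (c + (Off.Codebook.fast_huffman + 2 * k)) 2 := by
  apply acc_of_field hc hB
  · simp only [voff]
    omega
  · omega

/-- A block of a list of live blocks; the register form (`rdi = addr a`), as the contract of a check routine wants it; and
the side condition of the load that follows. -/
example (L : Layout) (mem : Mem) (Bs : List Block) (B : Block) (hin : B ∈ Bs) (hc : Covers (liveOf Bs) mem) (i : Nat)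
    (hi : 4 * i + 4 ≤ B.size) (hL : 0xC00000 ≤ L.hi) :
    AccessibleSmall mem (addr (B.base + 4 * i)).toNat 4 ∧ L.Has (addr (B.base + 4 * i)) 4 := by
  have hB := Block.live_of_mem hin
  constructor
  · exact acc_of_obj_addr hc hB (by omega) (by omega) (by omega)
  · exact has_of_obj hc hB (by omega) (by omega) (by omega) hL

/-- The range check of `vorbis_alloc`: `__asan_storeN_noabort(f', 1808)` on a fresh arena block. -/
example (Live : Nat → Prop) (mem : Mem) (B : Block) (hc : Covers Live mem) (hB : B.live Live) (hs : B.size = 1808) :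
    Accessible mem B.base Off.sizeof.stb_vorbis := by
  apply acc_of_obj_range hc hB (Nat.le_refl _)
  · simp only [voff]
    omega
  · simp only [voff]
    omega

/-! ### No axiom beyond Lean's three -/

#print axioms acc_of_obj
#print axioms X86.User.Mem.ofBV_signExtend32_u16
#print axioms X86.User.Mem.EqOn.i32
#print axioms Block.Same.of_writeLE

end Vorbis.FieldsTest
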